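-- pv_equiv track=rewrite | github.com/AliRahimi75/Verifiable-fixed-point-arithmetic | Figure 2/Useful_functions.py | MLE_vector_renov
-- ===== SOURCE A (Python) =====
-- def MLE_vector_renov(r, p):
--     l = len(r)
--     if l == 1:
--         return [(1-r[0]) % p, r[0] % p]
--     else:
--         a = MLE_vector_renov(r[1:], p)
--         b = [(1-r[0]) * a[i] % p for i in range(len(a))]
--         c = [r[0] * a[i] % p for i in range(len(a))]
--         d = b + c
--         return d
-- ===== SOURCE B (Python) =====
-- def MLE_vector_renov(r, p):
--     res = [(1 - r[-1]) % p, r[-1] % p]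
--     for x in reversed(r[:-1]):
--         res = [(1 - x) * a % p for a in res] + [x * a % p for a in res]
--     return res
-- ===== Notes on version B (the rewrite author's own statement) =====
-- stated objective: alternative
-- what changed: Replaced the head-first recursion (which rebuilds r[1:] slices and a call stack) with an iterative bottom-up accumulator: start from the last variable's two-entry vector and fold the remaining variables in reverse, doubling the list each step.
import Mathlib
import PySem

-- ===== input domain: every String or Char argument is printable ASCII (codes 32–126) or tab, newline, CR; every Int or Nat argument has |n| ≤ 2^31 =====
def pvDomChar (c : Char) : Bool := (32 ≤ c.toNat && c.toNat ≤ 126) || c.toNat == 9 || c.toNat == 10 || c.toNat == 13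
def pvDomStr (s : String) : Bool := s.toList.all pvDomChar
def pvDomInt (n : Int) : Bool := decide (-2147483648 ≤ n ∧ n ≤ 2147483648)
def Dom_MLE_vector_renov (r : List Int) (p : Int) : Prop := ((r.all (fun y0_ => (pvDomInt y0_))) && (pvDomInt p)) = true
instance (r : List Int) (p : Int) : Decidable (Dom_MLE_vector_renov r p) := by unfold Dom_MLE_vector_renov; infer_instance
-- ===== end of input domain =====

-- B replaces A's head-first recursion with an iterative bottom-up fold over the reversed prefix (alternative decomposition; same values).

-- ===== PORT A =====
-- Literal port of A's recursion; [] is excluded by Pre_ (Python recurses forever there).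
def MLE_vector_renov (r : List Int) (p : Int) : List Int :=
  match r with
  | [] => []
  | [x] => [PySem.Int.mod (1 - x) p, PySem.Int.mod x p]
  | x :: rest =>
    let a := MLE_vector_renov rest p
    let b := (PySem.List.pyRange 0 (a.length : Int) 1).map
      (fun i => PySem.Int.mod ((1 - x) * PySem.List.pyGetD a i 0) p)
    let c := (PySem.List.pyRange 0 (a.length : Int) 1).map
      (fun i => PySem.Int.mod (x * PySem.List.pyGetD a i 0) p)
    b ++ c

-- ===== PORT B =====
-- r[:-1] is exactly List.dropLast, r[-1] on nonempty r is getLast?; [] excluded by Pre_ (IndexError).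
def MLE_vector_renov_alt (r : List Int) (p : Int) : List Int :=
  match r.getLast? with
  | none => []
  | some last =>
    (r.dropLast.reverse).foldl
      (fun res x =>
        res.map (fun a => PySem.Int.mod ((1 - x) * a) p) ++
        res.map (fun a => PySem.Int.mod (x * a) p))
      [PySem.Int.mod (1 - last) p, PySem.Int.mod last p]

-- ===== PRECONDITION & SPEC =====
-- A infinite-recurses (RecursionError) on r = [] and raises ZeroDivisionError on p = 0.
def Pre_MLE_vector_renov (r : List Int) (p : Int) : Prop := r ≠ [] ∧ p ≠ 0
instance (r : List Int) (p : Int) : Decidable (Pre_MLE_vector_renov r p) := by unfold Pre_MLE_vector_renov; infer_instance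
def pvWitness_MLE_vector_renov : List Int × Int := ([1, 0], 5)

def Spec_MLE_vector_renov (r : List Int) (p : Int) (out : List Int) : Prop := out = MLE_vector_renov_alt r p
instance (r : List Int) (p : Int) (out : List Int) : Decidable (Spec_MLE_vector_renov r p out) := by unfold Spec_MLE_vector_renov; infer_instance

-- ===== CLAIM (what is proved, stated in full; the proofs are below) =====
def Claim_equal_MLE_vector_renov : Prop := ∀ (r : List Int) (p : Int), Dom_MLE_vector_renov r p → Pre_MLE_vector_renov r p → Spec_MLE_vector_renov r p (MLE_vector_renov r p)

-- ===== LEMMAS AND PROOFS =====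

-- the one-variable expansion step both programs perform
def mleStep (p x : Int) (res : List Int) : List Int :=
  res.map (fun a => PySem.Int.mod ((1 - x) * a) p) ++
  res.map (fun a => PySem.Int.mod (x * a) p)

-- A's indexed comprehension is a map
theorem range_index_map (a : List Int) (f : Int → Int) :
    (PySem.List.pyRange 0 (a.length : Int) 1).map (fun i => f (PySem.List.pyGetD a i 0)) = a.map f := by
  have h := PySem.List.map_pyGetD_pyRange_zero' (xs := a) (d := 0)
  calc (PySem.List.pyRange 0 (a.length : Int) 1).map (fun i => f (PySem.List.pyGetD a i 0))
      = ((PySem.List.pyRange 0 (a.length : Int) 1).map (fun i => PySem.List.pyGetD a i 0)).map f := by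
        rw [List.map_map]; rfl
    _ = a.map f := by rw [h]

theorem A_cons (x y : Int) (rest : List Int) (p : Int) :
    MLE_vector_renov (x :: y :: rest) p = mleStep p x (MLE_vector_renov (y :: rest) p) := by
  simp only [MLE_vector_renov, mleStep]
  rw [range_index_map _ (fun v => PySem.Int.mod ((1 - x) * v) p),
      range_index_map _ (fun v => PySem.Int.mod (x * v) p)]

theorem B_cons (x : Int) (rest : List Int) (hr : rest ≠ []) (p : Int) :
    MLE_vector_renov_alt (x :: rest) p = mleStep p x (MLE_vector_renov_alt rest p) := by
  obtain ⟨l, last, rfl⟩ := List.eq_nil_or_concat rest |>.resolve_left hr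
  rw [List.concat_eq_append, ← List.cons_append]
  simp only [MLE_vector_renov_alt, List.getLast?_concat, List.dropLast_concat,
    List.reverse_cons, List.foldl_append, List.foldl_cons, List.foldl_nil, mleStep]

theorem AB_eq (r : List Int) (p : Int) (hr : r ≠ []) :
    MLE_vector_renov r p = MLE_vector_renov_alt r p := by
  induction r with
  | nil => exact absurd rfl hr
  | cons x rest ih =>
    cases rest with
    | nil => simp [MLE_vector_renov, MLE_vector_renov_alt]
    | cons y t =>
      rw [A_cons, B_cons x (y :: t) (by simp) p, ih (by simp)]

-- ===== VERDICT (by name: the statement is the Claim_ definition above) =====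
theorem MLE_vector_renov_spec : Claim_equal_MLE_vector_renov := by
  intro r p _ hpre
  exact AB_eq r p hpre.1
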